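-- pv_equiv track=rewrite | github.com/B-ki/advent_of_code | 2024/07/P1.py | can_create_value
-- ===== SOURCE A (Python) =====
-- def can_create_value(value: int, nb: list[int]) -> bool:
--     memo = {}
--
--     def backtrack(remaining: list[int]) -> bool:
--         state = (tuple(sorted(remaining)))
--         if state in memo:
--             return memo[state]
--
--         if len(remaining) == 1:
--             if remaining[0] == value:
--                 return True
--             else:
--                 return False
--         if multiply_all(remaining) < value:
--             return False
--         if sum(remaining) > value:
--             return False
--         if max(remaining) > value:
--             return False
--
--         for i in range(len(remaining)):
--             for j in range(i + 1, len(remaining)):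
--                 a, b = remaining[i], remaining[j]
--                 next_numbers = [remaining[k] for k in range(len(remaining)) if k != i and k != j]
--                 if backtrack(next_numbers + [a + b]):
--                     memo[state] = True
--                     return True
--                 if backtrack(next_numbers + [a * b]):
--                     memo[state] = True
--                     return True
--         memo[state] = False
--         return False
--
--     return backtrack(sorted(nb, reverse=True))
--
-- def multiply_all(nb: list[int]) -> int:
--     result = 1
--     for i in nb:
--         result *= i
--     return result
-- ===== SOURCE B (Python) =====
-- def can_create_value(value: int, nb: list[int]) -> bool:
--     # Level-synchronous BFS over canonical (sorted-tuple) states with global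
--     # per-level dedup, instead of A's memoized pairwise-reduction DFS.
--     frontier = {tuple(sorted(nb))}
--     for _ in range(len(nb) - 1):
--         next_frontier = set()
--         for s in frontier:
--             p = 1
--             for x in s:
--                 p *= x
--             if p < value or sum(s) > value or s[-1] > value:
--                 continue
--             for i in range(len(s)):
--                 for j in range(i + 1, len(s)):
--                     rest = s[:i] + s[i + 1:j] + s[j + 1:]
--                     next_frontier.add(tuple(sorted(rest + (s[i] + s[j],))))
--                     next_frontier.add(tuple(sorted(rest + (s[i] * s[j],))))
--         frontier = next_frontier
--     return any(len(s) == 1 and s[0] == value for s in frontier)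
-- ===== Notes on version B (the rewrite author's own statement) =====
-- stated objective: alternative
-- what changed: Replaces A's memoized recursive backtracking (dict keyed by sorted tuple, early-return nested index loops) by an iterative level-synchronous BFS: one set of canonical sorted states per level, each level built from the previous by expanding all unpruned states, with the final singleton level checked at the end.
import Mathlib
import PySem

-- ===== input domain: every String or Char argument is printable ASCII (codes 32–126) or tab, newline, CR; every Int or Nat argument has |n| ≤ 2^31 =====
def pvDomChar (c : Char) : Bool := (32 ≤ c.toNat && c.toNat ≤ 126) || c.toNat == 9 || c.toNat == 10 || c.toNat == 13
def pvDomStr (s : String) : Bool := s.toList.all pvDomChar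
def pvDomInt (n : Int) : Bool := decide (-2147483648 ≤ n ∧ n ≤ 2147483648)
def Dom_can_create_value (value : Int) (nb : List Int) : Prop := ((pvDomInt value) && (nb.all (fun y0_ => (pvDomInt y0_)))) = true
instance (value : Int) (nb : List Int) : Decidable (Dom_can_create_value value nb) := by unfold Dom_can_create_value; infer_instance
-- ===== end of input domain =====

-- B replaces A's memoized pairwise-reduction DFS by a level-synchronous BFS over
-- canonical sorted states with per-level set dedup (objective: alternative, similar cost).

-- ===== PORT A =====

-- sum(l) for a list of ints
def pySum (l : List Int) : Int := l.foldl (fun a b => a + b) 0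

def multiply_all (nb : List Int) : Int := nb.foldl (fun result i => result * i) 1

-- [remaining[k] for k in range(len(remaining)) if k != i and k != j]
-- (indices come from range(len), so plain getD is exact here)
def nextNumbers (r : List Int) (i j : Nat) : List Int :=
  ((List.range r.length).filter (fun k => !(k == i) && !(k == j))).map (fun k => r.getD k 0)

-- backtrack, with the mutated closure dict `memo` threaded through; `fuel`
-- bounds the recursion depth (every recursive call strictly shortens the list,
-- so fuel = length + 1 at the top call is never exhausted).
def btrack (value : Int) : Nat → List Int → PySem.Dict (List Int) Bool → Bool × PySem.Dict (List Int) Bool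
  | 0, _, memo => (false, memo)
  | fuel + 1, remaining, memo =>
    let state := PySem.List.sorted remaining (fun x => x) false
    match PySem.Dict.get? memo state with
    | some v => (v, memo)
    | none =>
      if remaining.length == 1 then
        ((PySem.List.pyGetD remaining 0 0) == value, memo)
      else if multiply_all remaining < value then (false, memo)
      else if pySum remaining > value then (false, memo)
      else
        match PySem.List.max? remaining (fun x => x) with
        | none => (false, memo)  -- max([]) raises ValueError; outside Pre_
        | some mx =>
          if mx > value then (false, memo)
          else
            let res := (List.range remaining.length).foldl (fun st i =>
              ((List.range remaining.length).drop (i + 1)).foldl (fun st j =>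
                if st.1 then st   -- already returned
                else
                  let a := remaining.getD i 0
                  let b := remaining.getD j 0
                  let nn := nextNumbers remaining i j
                  let p := btrack value fuel (nn ++ [a + b]) st.2
                  if p.1 then (true, PySem.Dict.insert p.2 state true)
                  else
                    let q := btrack value fuel (nn ++ [a * b]) p.2
                    if q.1 then (true, PySem.Dict.insert q.2 state true)
                    else (false, q.2)) st) (false, memo)
            if res.1 then res else (false, PySem.Dict.insert res.2 state false)

def can_create_value (value : Int) (nb : List Int) : Bool :=
  (btrack value (nb.length + 1) (PySem.List.sorted nb (fun x => x) true) PySem.Dict.empty).1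

-- ===== PORT B =====

def can_create_value_alt (value : Int) (nb : List Int) : Bool :=
  let frontier0 : PySem.Set (List Int) := PySem.Set.ofList [PySem.List.sorted nb (fun x => x) false]
  let final := (List.range (nb.length - 1)).foldl (fun frontier _ =>
    frontier.foldl (fun nf s =>
      let p := s.foldl (fun a x => a * x) 1
      if p < value || pySum s > value || PySem.List.pyGetD s (-1) 0 > value then nf
      else
        (List.range s.length).foldl (fun nf (i : Nat) =>
          ((List.range s.length).drop (i + 1)).foldl (fun nf (j : Nat) =>
            let rest := PySem.List.slice s (some 0) (some (i : Int)) ++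
                        PySem.List.slice s (some ((i : Int) + 1)) (some (j : Int)) ++
                        PySem.List.slice s (some ((j : Int) + 1)) none
            let nf1 := PySem.Set.add nf
              (PySem.List.sorted (rest ++ [s.getD i 0 + s.getD j 0]) (fun x => x) false)
            PySem.Set.add nf1
              (PySem.List.sorted (rest ++ [s.getD i 0 * s.getD j 0]) (fun x => x) false) ) nf) nf
      ) (PySem.Set.empty)) frontier0
  final.any (fun s => s.length == 1 && (PySem.List.pyGetD s 0 0) == value)

-- ===== PRECONDITION & SPEC =====
-- Pre_ excludes exactly the inputs where A raises: nb = [] with value ∈ {0, 1}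
-- (there max([]) raises ValueError after the two arithmetic prunes fail to fire).
def Pre_can_create_value (value : Int) (nb : List Int) : Prop :=
  nb ≠ [] ∨ value < 0 ∨ 1 < value
instance (value : Int) (nb : List Int) : Decidable (Pre_can_create_value value nb) := by
  unfold Pre_can_create_value; infer_instance

def pvWitness_can_create_value : Int × List Int := (5, [2, 3])

def Spec_can_create_value (value : Int) (nb : List Int) (out : Bool) : Prop := out = can_create_value_alt value nb
instance (value : Int) (nb : List Int) (out : Bool) : Decidable (Spec_can_create_value value nb out) := by unfold Spec_can_create_value; infer_instance

-- ===== CLAIM (what is proved, stated in full; the proofs are below) =====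
def Claim_equal_can_create_value : Prop := ∀ (value : Int) (nb : List Int), Dom_can_create_value value nb → Pre_can_create_value value nb → Spec_can_create_value value nb (can_create_value value nb)

-- ===== LEMMAS AND PROOFS =====

-- The common reference function F: the pure "combine any two numbers by + or *
-- (with A's three prunes) until one remains" predicate, by structural pair choice.

-- all ways to pick one element of a list (element, rest in order)
def pickOne : List Int → List (Int × List Int)
  | [] => []
  | x :: xs => (x, xs) :: (pickOne xs).map (fun p => (p.1, x :: p.2))

-- all ways to pick an (ordered-position) pair of elements (first, second, rest)
def pick2 : List Int → List (Int × Int × List Int)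
  | [] => []
  | x :: xs => ((pickOne xs).map (fun p => (x, p.1, p.2))) ++
               ((pick2 xs).map (fun q => (q.1, q.2.1, x :: q.2.2)))

def maxv (r : List Int) : Int := (PySem.List.max? r (fun x => x)).getD 0

def F (value : Int) : Nat → List Int → Bool
  | 0, _ => false
  | fuel + 1, r =>
    if r.length == 1 then (r.getD 0 0) == value
    else if multiply_all r < value || pySum r > value || maxv r > value then false
    else (pick2 r).any (fun q =>
      F value fuel (q.2.2 ++ [q.1 + q.2.1]) || F value fuel (q.2.2 ++ [q.1 * q.2.1]))

def Fc (value : Int) (r : List Int) : Bool := F value r.length r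

-- ---- permutation machinery ----

theorem pickOne_perm {l : List Int} {p : Int × List Int} (h : p ∈ pickOne l) :
    l.Perm (p.1 :: p.2) := by
  induction l generalizing p with
  | nil => simp [pickOne] at h
  | cons x xs ih =>
    simp only [pickOne, List.mem_cons, List.mem_map] at h
    rcases h with rfl | ⟨p', hp', rfl⟩
    · rfl
    · exact ((ih hp').cons x).trans (List.Perm.swap _ _ _)

theorem pickOne_mem_of_mem {l : List Int} {y : Int} (h : y ∈ l) :
    (y, l.erase y) ∈ pickOne l := by
  induction l with
  | nil => simp at h
  | cons x xs ih =>
    by_cases hxy : x = y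
    · subst hxy; simp [pickOne, List.erase_cons_head]
    · rcases List.mem_cons.mp h with rfl | hy
      · exact absurd rfl hxy
      · have : (x :: xs).erase y = x :: xs.erase y :=
          List.erase_cons_tail (by simp [hxy])
        rw [this]
        simp only [pickOne, List.mem_cons, List.mem_map]
        exact Or.inr ⟨(y, xs.erase y), ih hy, rfl⟩

theorem pick2_perm {l : List Int} {q : Int × Int × List Int} (h : q ∈ pick2 l) :
    l.Perm (q.1 :: q.2.1 :: q.2.2) := by
  induction l generalizing q with
  | nil => simp [pick2] at h
  | cons x xs ih =>
    simp only [pick2, List.mem_append, List.mem_map] at h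
    rcases h with ⟨p, hp, rfl⟩ | ⟨q', hq', rfl⟩
    · exact (pickOne_perm hp).cons x
    · exact ((ih hq').cons x).trans (List.perm_middle (l₁ := [q'.1, q'.2.1])).symm

theorem pick2_mem_of_mem {l : List Int} {x y : Int} (hx : x ∈ l) (hy : y ∈ l.erase x) :
    ∃ q ∈ pick2 l, ((q.1 = x ∧ q.2.1 = y) ∨ (q.1 = y ∧ q.2.1 = x)) ∧
      q.2.2.Perm ((l.erase x).erase y) := by
  induction l with
  | nil => simp at hx
  | cons z zs ih =>
    by_cases hzx : z = x
    · subst hzx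
      rw [List.erase_cons_head] at hy ⊢
      refine ⟨(z, y, zs.erase y), ?_, Or.inl ⟨rfl, rfl⟩, List.Perm.refl _⟩
      simp only [pick2, List.mem_append, List.mem_map]
      exact Or.inl ⟨(y, zs.erase y), pickOne_mem_of_mem hy, rfl⟩
    · have hx' : x ∈ zs := by
        rcases List.mem_cons.mp hx with rfl | h
        · exact absurd rfl hzx
        · exact h
      have herase : (z :: zs).erase x = z :: zs.erase x :=
        List.erase_cons_tail (by simp [hzx])
      rw [herase] at hy ⊢
      by_cases hyz : y = z
      · subst hyz
        rw [List.erase_cons_head]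
        refine ⟨(y, x, zs.erase x), ?_, Or.inr ⟨rfl, rfl⟩, List.Perm.refl _⟩
        simp only [pick2, List.mem_append, List.mem_map]
        exact Or.inl ⟨(x, zs.erase x), pickOne_mem_of_mem hx', rfl⟩
      · have hy' : y ∈ zs.erase x := by
          rcases List.mem_cons.mp hy with rfl | h
          · exact absurd rfl hyz
          · exact h
        obtain ⟨q', hq', hmatch, hperm⟩ := ih hx' hy'
        refine ⟨(q'.1, q'.2.1, z :: q'.2.2), ?_, hmatch, ?_⟩
        · simp only [pick2, List.mem_append, List.mem_map]
          exact Or.inr ⟨q', hq', rfl⟩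
        · rw [List.erase_cons_tail (by simp; exact fun h => hyz h.symm)]
          exact hperm.cons z

theorem multiply_all_eq_prod (l : List Int) : multiply_all l = l.prod := by
  rw [List.prod_eq_foldl]; rfl

theorem multiply_all_perm {l l' : List Int} (h : l.Perm l') : multiply_all l = multiply_all l' := by
  rw [multiply_all_eq_prod, multiply_all_eq_prod, h.prod_eq]

theorem pySum_eq_sum (l : List Int) : pySum l = l.sum := by
  unfold pySum
  rw [show (fun (a b : Int) => a + b) = (fun (acc : Int) x => acc + id x) from rfl,
    PySem.List.foldl_add]
  simp

theorem pySum_perm {l l' : List Int} (h : l.Perm l') : pySum l = pySum l' := by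
  rw [pySum_eq_sum, pySum_eq_sum, h.sum_eq]

theorem maxv_perm {l l' : List Int} (h : l.Perm l') : maxv l = maxv l' := by
  unfold maxv
  rcases hl : PySem.List.max? l (fun x => x) with _ | m
  · rw [PySem.List.max?_eq_none_iff] at hl
    subst hl
    rw [← h.nil_eq]
    simp [PySem.List.max?]
  · rcases hl' : PySem.List.max? l' (fun x => x) with _ | m'
    · rw [PySem.List.max?_eq_none_iff] at hl'
      subst hl'
      have : ([] : List Int) = l := h.symm.nil_eq
      rw [← this] at hl
      simp [PySem.List.max?] at hl
    · have hm := PySem.List.max?_mem hl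
      have hm' := PySem.List.max?_mem hl'
      have h1 := PySem.List.max?_isMax hl m' (h.mem_iff.mpr hm')
      have h2 := PySem.List.max?_isMax hl' m (h.mem_iff.mp hm)
      simp only [Option.getD_some]
      omega

-- the pair-search step, characterised as a statement about the multiset
theorem pick2_any_iff (value : Int) (fuel : Nat)
    (hIH : ∀ {a b : List Int}, a.Perm b → F value fuel a = F value fuel b) (l : List Int) :
    ((pick2 l).any (fun q =>
        F value fuel (q.2.2 ++ [q.1 + q.2.1]) || F value fuel (q.2.2 ++ [q.1 * q.2.1])) = true)
    ↔ ∃ x y t, l.Perm (x :: y :: t) ∧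
        (F value fuel (t ++ [x + y]) || F value fuel (t ++ [x * y])) = true := by
  constructor
  · intro h
    obtain ⟨q, hq, hg⟩ := List.any_eq_true.mp h
    exact ⟨q.1, q.2.1, q.2.2, pick2_perm hq, hg⟩
  · rintro ⟨x, y, t, hp, hg⟩
    have hx : x ∈ l := hp.mem_iff.mpr (List.mem_cons_self ..)
    have herase : (l.erase x).Perm (y :: t) := by
      have := hp.erase x
      rwa [List.erase_cons_head] at this
    have hy : y ∈ l.erase x := herase.mem_iff.mpr (List.mem_cons_self ..)
    obtain ⟨q, hq, hmatch, hrest⟩ := pick2_mem_of_mem hx hy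
    have ht : q.2.2.Perm t := by
      refine hrest.trans ?_
      have := herase.erase y
      rwa [List.erase_cons_head] at this
    refine List.any_eq_true.mpr ⟨q, hq, ?_⟩
    rcases hmatch with ⟨h1, h2⟩ | ⟨h1, h2⟩
    · rw [h1, h2, hIH (ht.append_right [x + y]), hIH (ht.append_right [x * y])]
      exact hg
    · rw [h1, h2, Int.add_comm y x, Int.mul_comm y x,
        hIH (ht.append_right [x + y]), hIH (ht.append_right [x * y])]
      exact hg

theorem F_perm (value : Int) : ∀ (fuel : Nat) {l l' : List Int}, l.Perm l' →
    F value fuel l = F value fuel l' := by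
  intro fuel
  induction fuel with
  | zero => intro l l' _; rfl
  | succ fuel ih =>
    intro l l' h
    show F value (fuel + 1) l = F value (fuel + 1) l'
    rw [F, F]
    by_cases hlen : l.length = 1
    · obtain ⟨x, rfl⟩ := List.length_eq_one_iff.mp hlen
      have : l' = [x] := List.perm_singleton.mp h.symm
      subst this; rfl
    · have hlen' : l'.length ≠ 1 := by rw [← h.length_eq]; exact hlen
      simp only [beq_iff_eq, hlen, hlen', if_false]
      rw [multiply_all_perm h, pySum_perm h, maxv_perm h]
      by_cases hpr : (multiply_all l' < value || pySum l' > value || maxv l' > value) = true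
      · simp [hpr]
      · simp only [Bool.not_eq_true] at hpr
        simp only [hpr, if_false, Bool.false_eq_true]
        rw [Bool.eq_iff_iff, pick2_any_iff value fuel (fun ha => ih ha),
          pick2_any_iff value fuel (fun ha => ih ha)]
        constructor
        · rintro ⟨x, y, t, hp, hg⟩; exact ⟨x, y, t, h.symm.trans hp, hg⟩
        · rintro ⟨x, y, t, hp, hg⟩; exact ⟨x, y, t, h.trans hp, hg⟩

theorem any_congr_mem {α : Type} {l : List α} {p q : α → Bool}
    (h : ∀ x ∈ l, p x = q x) : l.any p = l.any q := by
  induction l with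
  | nil => rfl
  | cons x xs ih =>
    simp only [List.any_cons, h x (List.mem_cons_self ..),
      ih (fun y hy => h y (List.mem_cons_of_mem x hy))]

theorem pick2_rest_len {l : List Int} {q : Int × Int × List Int} (hq : q ∈ pick2 l) :
    l.length = q.2.2.length + 2 := by
  have := (pick2_perm hq).length_eq
  simpa using this

theorem F_fuel_le (value : Int) : ∀ (f1 : Nat), ∀ (f2 : Nat) (r : List Int), r ≠ [] →
    r.length ≤ f1 → r.length ≤ f2 → F value f1 r = F value f2 r := by
  intro f1
  induction f1 with
  | zero =>
    intro f2 r hne h1 _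
    have : r.length ≠ 0 := by simpa using hne
    omega
  | succ n1 ih =>
    intro f2 r hne h1 h2
    have hrl : r.length ≠ 0 := by simpa using hne
    rcases f2 with _ | n2
    · omega
    rw [F, F]
    by_cases hlen : r.length = 1
    · simp [hlen]
    · simp only [beq_iff_eq, hlen, if_false]
      by_cases hpr : (multiply_all r < value || pySum r > value || maxv r > value) = true
      · simp [hpr]
      · simp only [Bool.not_eq_true] at hpr
        simp only [hpr, if_false, Bool.false_eq_true]
        refine any_congr_mem (fun q hq => ?_)
        have hql := pick2_rest_len hq
        have hne1 : q.2.2 ++ [q.1 + q.2.1] ≠ [] := by simp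
        have hne2 : q.2.2 ++ [q.1 * q.2.1] ≠ [] := by simp
        have hl1 : (q.2.2 ++ [q.1 + q.2.1]).length = q.2.2.length + 1 := by simp
        have hl2 : (q.2.2 ++ [q.1 * q.2.1]).length = q.2.2.length + 1 := by simp
        rw [ih n2 _ hne1 (by omega) (by omega), ih n2 _ hne2 (by omega) (by omega)]

theorem F_fuel (value : Int) : ∀ (fuel : Nat) (r : List Int), r ≠ [] → r.length ≤ fuel →
    F value fuel r = Fc value r :=
  fun fuel r hne h => F_fuel_le value fuel r.length r hne h (le_refl _)

-- ---- index pairs / loop flattening ----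

def idxPairs (n : Nat) : List (Nat × Nat) :=
  (List.range n).flatMap (fun i => ((List.range n).drop (i + 1)).map (fun j => (i, j)))

theorem foldl_nested_flatMap {σ ι₁ ι₂ : Type} (L : List ι₁) (M : ι₁ → List ι₂)
    (f : σ → ι₁ → ι₂ → σ) (init : σ) :
    L.foldl (fun st i => (M i).foldl (fun st j => f st i j) st) init
      = (L.flatMap (fun i => (M i).map (fun j => (i, j)))).foldl
          (fun st p => f st p.1 p.2) init := by
  induction L generalizing init with
  | nil => rfl
  | cons x xs ih =>
    simp only [List.foldl_cons, List.flatMap_cons, List.foldl_append, List.foldl_map]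
    exact ih _

theorem map_getD_range {α : Type} (l : List α) (d : α) :
    (List.range l.length).map (fun k => l.getD k d) = l := by
  induction l with
  | nil => rfl
  | cons x xs ih =>
    rw [List.length_cons, List.range_succ_eq_map, List.map_cons, List.map_map]
    simp only [List.getD_cons_zero, Function.comp_def, List.getD_cons_succ]
    rw [ih]

theorem eraseIdx_eq_filter_map (xs : List Int) : ∀ (j : Nat),
    xs.eraseIdx j = ((List.range xs.length).filter (fun k => !(k == j))).map (fun k => xs.getD k 0) := by
  induction xs with
  | nil => intro j; rfl
  | cons c cs ih =>
    intro j
    rw [List.length_cons, List.range_succ_eq_map, List.filter_cons]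
    cases j with
    | zero =>
      simp only [beq_self_eq_true, Bool.not_true, if_false, List.eraseIdx_zero,
        List.filter_map, List.map_map, List.tail_cons]
      rw [if_neg (by simp : ¬(false = true))]
      rw [List.filter_eq_self.mpr (fun a _ => by simp : ∀ a ∈ List.range cs.length,
        ((fun k : Nat => !(k == 0)) ∘ Nat.succ) a = true)]
      rw [List.map_map]
      simp only [Function.comp_def, List.getD_cons_succ]
      exact (map_getD_range cs 0).symm
    | succ j =>
      simp only [show ((0:Nat) == j+1) = false by simp, Bool.not_false, if_true,
        List.eraseIdx_cons_succ, List.filter_map, List.map_map, List.map_cons,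
        List.getD_cons_zero]
      congr 1
      have hpred : ((fun k : Nat => !(k == j+1)) ∘ Nat.succ) = (fun k : Nat => !(k == j)) := by
        funext k; simp
      rw [hpred, ih j]
      simp [Function.comp_def]

theorem pickOne_eq (xs : List Int) :
    pickOne xs = (List.range xs.length).map (fun j => (xs.getD j 0, xs.eraseIdx j)) := by
  induction xs with
  | nil => rfl
  | cons c cs ih =>
    rw [pickOne, List.length_cons, List.range_succ_eq_map, List.map_cons, List.map_map, ih,
      List.map_map]
    simp [Function.comp_def]

theorem nextNumbers_zero_succ (x : Int) (xs : List Int) (j : Nat) :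
    nextNumbers (x :: xs) 0 (j + 1) = xs.eraseIdx j := by
  unfold nextNumbers
  rw [List.length_cons, List.range_succ_eq_map, List.filter_cons]
  simp only [beq_self_eq_true, Bool.not_true, Bool.false_and, if_false, List.filter_map,
    List.map_map]
  have hpred : ((fun k : Nat => !(k == 0) && !(k == j+1)) ∘ Nat.succ) = (fun k : Nat => !(k == j)) := by
    funext k; simp
  rw [hpred, eraseIdx_eq_filter_map xs j]
  simp [Function.comp_def]

theorem nextNumbers_succ_succ (x : Int) (xs : List Int) (i j : Nat) :
    nextNumbers (x :: xs) (i + 1) (j + 1) = x :: nextNumbers xs i j := by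
  unfold nextNumbers
  rw [List.length_cons, List.range_succ_eq_map, List.filter_cons]
  simp only [show ((0:Nat) == i+1) = false by simp, show ((0:Nat) == j+1) = false by simp,
    Bool.not_false, Bool.and_self, if_true, List.filter_map, List.map_map, List.map_cons,
    List.getD_cons_zero]
  congr 1
  have hpred : ((fun k : Nat => !(k == i+1) && !(k == j+1)) ∘ Nat.succ)
      = (fun k : Nat => !(k == i) && !(k == j)) := by
    funext k; simp
  rw [hpred]
  simp [Function.comp_def]

theorem idxPairs_succ (n : Nat) :
    idxPairs (n + 1) = ((List.range n).map (fun j => (0, j+1))) ++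
      ((idxPairs n).map (fun p => (p.1 + 1, p.2 + 1))) := by
  unfold idxPairs
  rw [List.range_succ_eq_map, List.flatMap_cons]
  congr 1
  · rw [List.drop_one, List.tail_cons, List.map_map]; rfl
  · rw [List.flatMap_map, List.map_flatMap]
    refine List.flatMap_congr (fun i _ => ?_)
    rw [List.drop_succ_cons, ← List.map_drop, List.map_map, List.map_map]
    rfl

theorem pick2_eq_idx : ∀ (r : List Int),
    pick2 r = (idxPairs r.length).map (fun p => (r.getD p.1 0, r.getD p.2 0, nextNumbers r p.1 p.2)) := by
  intro r
  induction r with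
  | nil => rfl
  | cons x xs ih =>
    show pick2 (x :: xs) = _
    rw [pick2, List.length_cons, idxPairs_succ, List.map_append, List.map_map, List.map_map,
      pickOne_eq, List.map_map, ih, List.map_map]
    congr 1
    · refine List.map_congr_left (fun j _ => ?_)
      simp [Function.comp, nextNumbers_zero_succ]
    · refine List.map_congr_left (fun p _ => ?_)
      simp [Function.comp, nextNumbers_succ_succ]

-- ---- A-side proof ----

def MemoInv (value : Int) (memo : PySem.Dict (List Int) Bool) : Prop :=
  ∀ k v, PySem.Dict.get? memo k = some v → v = Fc value k

theorem Fc_one {value : Int} {r : List Int} (h : r.length = 1) :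
    Fc value r = (r.getD 0 0 == value) := by
  unfold Fc
  rw [h, F]
  simp [h]

theorem Fc_step {value : Int} {r : List Int} (h : 2 ≤ r.length) :
    Fc value r = (if multiply_all r < value || pySum r > value || maxv r > value then false
      else (pick2 r).any (fun q =>
        Fc value (q.2.2 ++ [q.1 + q.2.1]) || Fc value (q.2.2 ++ [q.1 * q.2.1]))) := by
  unfold Fc
  obtain ⟨k, hk⟩ : ∃ k, r.length = k + 1 := ⟨r.length - 1, by omega⟩
  rw [hk, F]
  have h1 : (r.length == 1) = false := by simp; omega
  rw [h1]
  simp only [Bool.false_eq_true, if_false]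
  split
  · rfl
  · refine any_congr_mem (fun q hq => ?_)
    have hql := pick2_rest_len hq
    have e1 : F value k (q.2.2 ++ [q.1 + q.2.1]) = Fc value (q.2.2 ++ [q.1 + q.2.1]) :=
      F_fuel value k _ (by simp) (by simp; omega)
    have e2 : F value k (q.2.2 ++ [q.1 * q.2.1]) = Fc value (q.2.2 ++ [q.1 * q.2.1]) :=
      F_fuel value k _ (by simp) (by simp; omega)
    rw [e1, e2]
    rfl

-- the inner pair loop of backtrack, as a fold over pick2
def stepC (value : Int) (fuel : Nat) (state : List Int) :
    (Bool × PySem.Dict (List Int) Bool) → (Int × Int × List Int) → (Bool × PySem.Dict (List Int) Bool) :=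
  fun st q =>
    if st.1 then st
    else
      let p := btrack value fuel (q.2.2 ++ [q.1 + q.2.1]) st.2
      if p.1 then (true, PySem.Dict.insert p.2 state true)
      else
        let qq := btrack value fuel (q.2.2 ++ [q.1 * q.2.1]) p.2
        if qq.1 then (true, PySem.Dict.insert qq.2 state true)
        else (false, qq.2)

theorem btrack_loop_eq (value : Int) (fuel : Nat) (state r : List Int)
    (init : Bool × PySem.Dict (List Int) Bool) :
    ((List.range r.length).foldl (fun st i =>
      ((List.range r.length).drop (i + 1)).foldl (fun st j =>
        if st.1 then st
        else
          let a := r.getD i 0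
          let b := r.getD j 0
          let nn := nextNumbers r i j
          let p := btrack value fuel (nn ++ [a + b]) st.2
          if p.1 then (true, PySem.Dict.insert p.2 state true)
          else
            let q := btrack value fuel (nn ++ [a * b]) p.2
            if q.1 then (true, PySem.Dict.insert q.2 state true)
            else (false, q.2)) st) init)
    = (pick2 r).foldl (stepC value fuel state) init := by
  rw [foldl_nested_flatMap]
  rw [pick2_eq_idx r, List.foldl_map]
  rfl

theorem loop_skip (value : Int) (fuel : Nat) (state : List Int) :
    ∀ (Q : List (Int × Int × List Int)) (m : PySem.Dict (List Int) Bool),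
    Q.foldl (stepC value fuel state) (true, m) = (true, m) := by
  intro Q
  induction Q with
  | nil => intro m; rfl
  | cons q Q ih => intro m; rw [List.foldl_cons]; exact ih m

theorem loop_spec (value : Int) (fuel : Nat) (state r : List Int)
    (Hrec : ∀ (r' : List Int) (m : PySem.Dict (List Int) Bool), r' ≠ [] → r'.length ≤ fuel →
      MemoInv value m → (btrack value fuel r' m).1 = Fc value r' ∧ MemoInv value (btrack value fuel r' m).2)
    (hlen : r.length ≤ fuel + 1)
    (hstate : Fc value state = Fc value r)
    (hFcr : Fc value r = (pick2 r).any (fun q =>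
      Fc value (q.2.2 ++ [q.1 + q.2.1]) || Fc value (q.2.2 ++ [q.1 * q.2.1]))) :
    ∀ (Q : List (Int × Int × List Int)), (∀ q ∈ Q, q ∈ pick2 r) →
    ∀ (m : PySem.Dict (List Int) Bool), MemoInv value m →
    (Q.foldl (stepC value fuel state) (false, m)).1
        = Q.any (fun q => Fc value (q.2.2 ++ [q.1 + q.2.1]) || Fc value (q.2.2 ++ [q.1 * q.2.1]))
      ∧ MemoInv value (Q.foldl (stepC value fuel state) (false, m)).2 := by
  intro Q
  induction Q with
  | nil => intro _ m hm; exact ⟨rfl, hm⟩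
  | cons q Q ih =>
    intro hQ m hm
    have hqmem : q ∈ pick2 r := hQ q (List.mem_cons_self ..)
    have hql := pick2_rest_len hqmem
    have hne1 : q.2.2 ++ [q.1 + q.2.1] ≠ [] := by simp
    have hne2 : q.2.2 ++ [q.1 * q.2.1] ≠ [] := by simp
    have hl1 : (q.2.2 ++ [q.1 + q.2.1]).length ≤ fuel := by simp; omega
    have hl2 : (q.2.2 ++ [q.1 * q.2.1]).length ≤ fuel := by simp; omega
    obtain ⟨hp1, hp2⟩ := Hrec (q.2.2 ++ [q.1 + q.2.1]) m hne1 hl1 hm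
    rw [List.foldl_cons]
    -- evaluate one step
    by_cases hadd : (btrack value fuel (q.2.2 ++ [q.1 + q.2.1]) m).1 = true
    · -- plus child succeeds
      have hFctrue : Fc value r = true := by
        rw [hFcr]
        exact List.any_eq_true.mpr ⟨q, hqmem, by rw [← hp1, hadd]; simp⟩
      have hstep : stepC value fuel state (false, m) q
          = (true, PySem.Dict.insert (btrack value fuel (q.2.2 ++ [q.1 + q.2.1]) m).2 state true) := by
        simp [stepC, hadd]
      rw [hstep, loop_skip]
      refine ⟨by rw [List.any_cons, ← hp1, hadd]; simp, ?_⟩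
      intro k v hkv
      rw [PySem.Dict.get?_insert] at hkv
      split at hkv
      · rename_i hk; cases hkv; rw [hk, hstate, hFctrue]
      · exact hp2 k v hkv
    · have hadd' : (btrack value fuel (q.2.2 ++ [q.1 + q.2.1]) m).1 = false :=
        Bool.not_eq_true _ ▸ (by simpa using hadd)
      obtain ⟨hq1, hq2⟩ := Hrec (q.2.2 ++ [q.1 * q.2.1])
        (btrack value fuel (q.2.2 ++ [q.1 + q.2.1]) m).2 hne2 hl2 hp2
      by_cases hmul : (btrack value fuel (q.2.2 ++ [q.1 * q.2.1])
          (btrack value fuel (q.2.2 ++ [q.1 + q.2.1]) m).2).1 = true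
      · have hFctrue : Fc value r = true := by
          rw [hFcr]
          exact List.any_eq_true.mpr ⟨q, hqmem, by rw [← hq1, hmul]; simp⟩
        have hstep : stepC value fuel state (false, m) q
            = (true, PySem.Dict.insert (btrack value fuel (q.2.2 ++ [q.1 * q.2.1])
                (btrack value fuel (q.2.2 ++ [q.1 + q.2.1]) m).2).2 state true) := by
          simp [stepC, hadd', hmul]
        rw [hstep, loop_skip]
        refine ⟨by rw [List.any_cons, ← hq1, hmul]; simp, ?_⟩
        intro k v hkv
        rw [PySem.Dict.get?_insert] at hkv
        split at hkv
        · rename_i hk; cases hkv; rw [hk, hstate, hFctrue]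
        · exact hq2 k v hkv
      · have hmul' : (btrack value fuel (q.2.2 ++ [q.1 * q.2.1])
            (btrack value fuel (q.2.2 ++ [q.1 + q.2.1]) m).2).1 = false := by
          simpa using hmul
        have hstep : stepC value fuel state (false, m) q
            = (false, (btrack value fuel (q.2.2 ++ [q.1 * q.2.1])
                (btrack value fuel (q.2.2 ++ [q.1 + q.2.1]) m).2).2) := by
          simp [stepC, hadd', hmul']
        rw [hstep]
        obtain ⟨ih1, ih2⟩ := ih (fun q' hq' => hQ q' (List.mem_cons_of_mem q hq')) _ hq2
        refine ⟨?_, ih2⟩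
        rw [ih1, List.any_cons, ← hp1, ← hq1, hadd', hmul']
        simp

theorem btrack_spec (value : Int) : ∀ (fuel : Nat) (r : List Int) (memo : PySem.Dict (List Int) Bool),
    r ≠ [] → r.length ≤ fuel → MemoInv value memo →
    (btrack value fuel r memo).1 = Fc value r ∧ MemoInv value (btrack value fuel r memo).2 := by
  intro fuel
  induction fuel with
  | zero =>
    intro r _ hne hl _
    have : r.length ≠ 0 := by simpa using hne
    omega
  | succ fuel ih =>
    intro r memo hne hl hm
    have hrl : r.length ≠ 0 := by simpa using hne
    have hperm : (PySem.List.sorted r (fun x => x) false).Perm r := PySem.List.sorted_perm ..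
    have hstate : Fc value (PySem.List.sorted r (fun x => x) false) = Fc value r := by
      unfold Fc
      rw [hperm.length_eq]
      exact F_perm value r.length hperm
    rw [btrack]
    rcases hget : PySem.Dict.get? memo (PySem.List.sorted r (fun x => x) false) with _ | v
    · simp only [hget]
      by_cases hlen1 : r.length = 1
      · simp only [hlen1, if_pos rfl, beq_self_eq_true, if_true]
        refine ⟨?_, hm⟩
        rw [Fc_one hlen1]
        simp [PySem.List.pyGetD, PySem.List.pyIdx?, PySem.List.pyGet?]
        rcases r with _ | ⟨x, r⟩
        · simp at hrl
        · rcases r with _ | _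
          · rfl
          · simp at hlen1
      · have hlen2 : 2 ≤ r.length := by omega
        have h1 : (r.length == 1) = false := by simp; omega
        rw [h1]
        simp only [Bool.false_eq_true, if_false]
        by_cases hmul : multiply_all r < value
        · rw [if_pos hmul]
          refine ⟨?_, hm⟩
          rw [Fc_step hlen2, if_pos (by simp [hmul])]
        · rw [if_neg hmul]
          by_cases hsum : pySum r > value
          · rw [if_pos hsum]
            refine ⟨?_, hm⟩
            rw [Fc_step hlen2, if_pos (by simp [hsum])]
          · rw [if_neg hsum]
            rcases hmax : PySem.List.max? r (fun x => x) with _ | mx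
            · dsimp only
              rw [PySem.List.max?_eq_none_iff] at hmax
              exact absurd hmax hne
            · dsimp only
              have hmaxv : maxv r = mx := by unfold maxv; rw [hmax]; rfl
              by_cases hmx : mx > value
              · rw [if_pos hmx]
                refine ⟨?_, hm⟩
                rw [Fc_step hlen2, if_pos (by simp [hmaxv, hmx])]
              · rw [if_neg hmx]
                have hFcr : Fc value r = (pick2 r).any (fun q =>
                    Fc value (q.2.2 ++ [q.1 + q.2.1]) || Fc value (q.2.2 ++ [q.1 * q.2.1])) := by
                  rw [Fc_step hlen2, if_neg (by simp [hmaxv]; omega)]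
                rw [btrack_loop_eq value fuel (PySem.List.sorted r (fun x => x) false) r (false, memo)]
                obtain ⟨hres1, hres2⟩ := loop_spec value fuel _ r ih hl hstate hFcr
                  (pick2 r) (fun _ h => h) memo hm
                by_cases hfound : ((pick2 r).foldl
                    (stepC value fuel (PySem.List.sorted r (fun x => x) false)) (false, memo)).1 = true
                · rw [if_pos hfound]
                  exact ⟨by rw [hfound, hFcr, ← hres1, hfound], hres2⟩
                · rw [if_neg hfound]
                  have hfound' : ((pick2 r).foldl
                      (stepC value fuel (PySem.List.sorted r (fun x => x) false)) (false, memo)).1 = false := by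
                    simpa using hfound
                  refine ⟨by rw [hFcr, ← hres1, hfound'], ?_⟩
                  intro k v hkv
                  rw [PySem.Dict.get?_insert] at hkv
                  split at hkv
                  · rename_i hk; cases hkv
                    rw [hk, hstate, hFcr, ← hres1, hfound']
                  · exact hres2 k v hkv
    · simp only [hget]
      refine ⟨?_, hm⟩
      rw [hm _ v hget, hstate]

-- ---- B-side proof ----

theorem set_any_add {α : Type} [BEq α] [LawfulBEq α] (s : PySem.Set α) (x : α) (p : α → Bool) :
    (PySem.Set.add s x).any p = (s.any p || p x) := by
  rw [PySem.Set.add_eq_ite]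
  split
  · rename_i hx
    cases hpx : p x
    · simp
    · have : s.any p = true := List.any_eq_true.mpr ⟨x, hx, hpx⟩
      simp [this]
  · simp [List.any_append]

theorem foldl_set_any {ι α : Type} (L : List ι) (step : List α → ι → List α)
    (c : ι → Bool) (p : α → Bool)
    (h : ∀ acc i, i ∈ L → (step acc i).any p = (acc.any p || c i)) :
    ∀ acc, (L.foldl step acc).any p = (acc.any p || L.any c) := by
  induction L with
  | nil => intro acc; simp
  | cons x xs ih =>
    intro acc
    rw [List.foldl_cons, ih (fun acc i hi => h acc i (List.mem_cons_of_mem x hi)),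
      h acc x (List.mem_cons_self ..), List.any_cons, Bool.or_assoc]

theorem foldl_set_mem {ι α : Type} (L : List ι) (step : List α → ι → List α)
    (P : α → Prop)
    (h : ∀ acc i, i ∈ L → ∀ x, x ∈ step acc i → x ∈ acc ∨ P x) :
    ∀ acc x, x ∈ L.foldl step acc → x ∈ acc ∨ P x := by
  induction L with
  | nil => intro acc x hx; exact Or.inl hx
  | cons y ys ih =>
    intro acc x hx
    rw [List.foldl_cons] at hx
    rcases ih (fun acc i hi => h acc i (List.mem_cons_of_mem y hi)) _ x hx with h1 | h1
    · exact h acc y (List.mem_cons_self ..) x h1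
    · exact Or.inr h1

theorem mem_idxPairs {n : Nat} {p : Nat × Nat} (hp : p ∈ idxPairs n) : p.1 < p.2 ∧ p.2 < n := by
  unfold idxPairs at hp
  rw [List.mem_flatMap] at hp
  obtain ⟨i, hi, hmem⟩ := hp
  rw [List.mem_map] at hmem
  obtain ⟨j, hj, rfl⟩ := hmem
  rw [List.mem_range] at hi
  obtain ⟨k, hk, hkj⟩ := List.mem_iff_getElem.mp hj
  rw [List.getElem_drop] at hkj
  have hlt : i + 1 + k < n := by
    have := hk
    simp only [List.length_drop, List.length_range] at this
    omega
  rw [List.getElem_range] at hkj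
  subst hkj
  simp only
  omega

theorem nextNumbers_takedrop : ∀ (s : List Int) (i j : Nat), i < j →
    nextNumbers s i j = s.take i ++ ((s.drop (i + 1)).take (j - (i + 1))) ++ s.drop (j + 1) := by
  intro s
  induction s with
  | nil => intro i j _; simp [nextNumbers]
  | cons x xs ih =>
    intro i j hij
    rcases j with _ | j
    · omega
    rcases i with _ | i
    · rw [nextNumbers_zero_succ]
      simp only [List.take_zero, List.nil_append, List.drop_succ_cons, List.drop_zero,
        Nat.sub_zero, Nat.add_sub_cancel]
      exact List.eraseIdx_eq_take_drop_succ xs j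
    · rw [nextNumbers_succ_succ]
      simp only [List.take_succ_cons, List.drop_succ_cons]
      rw [ih i j (by omega)]
      simp

theorem Fc_sorted (value : Int) (c : List Int) :
    Fc value (PySem.List.sorted c (fun x => x) false) = Fc value c := by
  unfold Fc
  rw [PySem.List.length_sorted]
  exact F_perm value c.length (PySem.List.sorted_perm ..)

theorem pairwise_le_getLast : ∀ {s : List Int}, s.Pairwise (fun a b => a ≤ b) →
    (hne : s ≠ []) → ∀ x ∈ s, x ≤ s.getLast hne := by
  intro s
  induction s with
  | nil => intro _ hne; exact absurd rfl hne
  | cons a t ih =>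
    intro hpw hne x hx
    rw [List.pairwise_cons] at hpw
    rcases t with _ | ⟨b, t'⟩
    · simp at hx; subst hx; rfl
    · rw [List.getLast_cons (by simp)]
      rcases List.mem_cons.mp hx with rfl | hx'
      · exact le_trans (hpw.1 _ (List.getLast_mem _)) (le_refl _)
      · exact ih hpw.2 (by simp) x hx'

theorem canon_last_eq_maxv {s : List Int} (hne : s ≠ [])
    (hs : PySem.List.sorted s (fun x => x) false = s) :
    PySem.List.pyGetD s (-1) 0 = maxv s := by
  rw [PySem.List.pyGetD_neg_ofNat s 1 0 (by omega)
    (by have : s.length ≠ 0 := by simpa using hne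
        omega)]
  rw [← List.getLast_eq_getElem hne]
  have hpw : s.Pairwise (fun a b => a ≤ b) := by
    have h0 : (PySem.List.sorted s (fun x => x) false).Pairwise
        (fun a b => (fun x : Int => x) a ≤ (fun x : Int => x) b) := PySem.List.sorted_pairwise ..
    rw [hs] at h0
    exact h0
  rcases hm : PySem.List.max? s (fun x => x) with _ | m
  · rw [PySem.List.max?_eq_none_iff] at hm; exact absurd hm hne
  · have h1 := PySem.List.max?_isMax hm (s.getLast hne) (List.getLast_mem hne)
    have h2 : m ≤ s.getLast hne := pairwise_le_getLast hpw hne m (PySem.List.max?_mem hm)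
    unfold maxv
    rw [hm, Option.getD_some]
    omega

-- one BFS level of B, named for the proofs (definitionally the loop body of the port)
def stepB (value : Int) (frontier : PySem.Set (List Int)) : PySem.Set (List Int) :=
  frontier.foldl (fun nf s =>
    let p := s.foldl (fun a x => a * x) 1
    if p < value || pySum s > value || PySem.List.pyGetD s (-1) 0 > value then nf
    else
      (List.range s.length).foldl (fun nf (i : Nat) =>
        ((List.range s.length).drop (i + 1)).foldl (fun nf (j : Nat) =>
          let rest := PySem.List.slice s (some 0) (some (i : Int)) ++
                      PySem.List.slice s (some ((i : Int) + 1)) (some (j : Int)) ++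
                      PySem.List.slice s (some ((j : Int) + 1)) none
          let nf1 := PySem.Set.add nf
            (PySem.List.sorted (rest ++ [s.getD i 0 + s.getD j 0]) (fun x => x) false)
          PySem.Set.add nf1
            (PySem.List.sorted (rest ++ [s.getD i 0 * s.getD j 0]) (fun x => x) false)) nf) nf
  ) PySem.Set.empty

theorem rest_eq_nextNumbers (s : List Int) (i j : Nat) (hij : i < j) :
    PySem.List.slice s (some 0) (some (i : Int)) ++
      PySem.List.slice s (some ((i : Int) + 1)) (some (j : Int)) ++
      PySem.List.slice s (some ((j : Int) + 1)) none
    = nextNumbers s i j := by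
  have c1 : ((i : Int) + 1) = ((i + 1 : Nat) : Int) := by push_cast; ring
  have c2 : ((j : Int) + 1) = ((j + 1 : Nat) : Int) := by push_cast; ring
  rw [PySem.List.slice_zero_start, PySem.List.slice_to_natCast, c1, c2,
    PySem.List.slice_natCast, PySem.List.slice_from_natCast, nextNumbers_takedrop s i j hij]

theorem inner_any (value : Int) (s : List Int) (nf : List (List Int)) :
    ((List.range s.length).foldl (fun nf (i : Nat) =>
        ((List.range s.length).drop (i + 1)).foldl (fun nf (j : Nat) =>
          let rest := PySem.List.slice s (some 0) (some (i : Int)) ++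
                      PySem.List.slice s (some ((i : Int) + 1)) (some (j : Int)) ++
                      PySem.List.slice s (some ((j : Int) + 1)) none
          let nf1 := PySem.Set.add nf
            (PySem.List.sorted (rest ++ [s.getD i 0 + s.getD j 0]) (fun x => x) false)
          PySem.Set.add nf1
            (PySem.List.sorted (rest ++ [s.getD i 0 * s.getD j 0]) (fun x => x) false)) nf) nf).any (Fc value)
    = (nf.any (Fc value) || (pick2 s).any (fun q =>
        Fc value (q.2.2 ++ [q.1 + q.2.1]) || Fc value (q.2.2 ++ [q.1 * q.2.1]))) := by
  rw [foldl_nested_flatMap]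
  rw [foldl_set_any _ _ (fun p =>
      Fc value (nextNumbers s p.1 p.2 ++ [s.getD p.1 0 + s.getD p.2 0]) ||
      Fc value (nextNumbers s p.1 p.2 ++ [s.getD p.1 0 * s.getD p.2 0])) (Fc value) ?_ nf]
  · congr 1
    rw [pick2_eq_idx s, List.any_map]
    refine any_congr_mem (fun p hp => ?_)
    rfl
  · intro acc p hp
    have hij := (mem_idxPairs hp).1
    show (PySem.Set.add (PySem.Set.add acc _) _).any (Fc value) = _
    rw [set_any_add, set_any_add, Bool.or_assoc]
    rw [rest_eq_nextNumbers s p.1 p.2 hij, Fc_sorted, Fc_sorted]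

theorem inner_mem (value : Int) (s : List Int) (nf : List (List Int)) (x : List Int)
    (hx : x ∈ ((List.range s.length).foldl (fun nf (i : Nat) =>
        ((List.range s.length).drop (i + 1)).foldl (fun nf (j : Nat) =>
          let rest := PySem.List.slice s (some 0) (some (i : Int)) ++
                      PySem.List.slice s (some ((i : Int) + 1)) (some (j : Int)) ++
                      PySem.List.slice s (some ((j : Int) + 1)) none
          let nf1 := PySem.Set.add nf
            (PySem.List.sorted (rest ++ [s.getD i 0 + s.getD j 0]) (fun x => x) false)
          PySem.Set.add nf1
            (PySem.List.sorted (rest ++ [s.getD i 0 * s.getD j 0]) (fun x => x) false)) nf) nf)) :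
    x ∈ nf ∨ (x.length = s.length - 1 ∧ PySem.List.sorted x (fun x => x) false = x) := by
  rw [foldl_nested_flatMap] at hx
  refine foldl_set_mem _ _ (fun y => y.length = s.length - 1 ∧ PySem.List.sorted y (fun x => x) false = y) ?_ nf x hx
  intro acc p hp y hy
  obtain ⟨hij, hjn⟩ := mem_idxPairs hp
  rw [PySem.Set.mem_add, PySem.Set.mem_add] at hy
  have hrest : (PySem.List.slice s (some 0) (some ((p.1 : Nat) : Int)) ++
      PySem.List.slice s (some (((p.1 : Nat) : Int) + 1)) (some ((p.2 : Nat) : Int)) ++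
      PySem.List.slice s (some (((p.2 : Nat) : Int) + 1)) none).length = s.length - 2 := by
    rw [rest_eq_nextNumbers s p.1 p.2 hij, nextNumbers_takedrop s p.1 p.2 hij]
    simp
    omega
  rcases hy with (hy | rfl) | rfl
  · exact Or.inl hy
  · refine Or.inr ⟨?_, PySem.List.sorted_sorted ..⟩
    rw [PySem.List.length_sorted, List.length_append, hrest]
    simp
    omega
  · refine Or.inr ⟨?_, PySem.List.sorted_sorted ..⟩
    rw [PySem.List.length_sorted, List.length_append, hrest]
    simp
    omega

theorem stepB_spec (value : Int) (L : Nat) (hL : 2 ≤ L) (frontier : List (List Int))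
    (hinv : ∀ s ∈ frontier, s.length = L ∧ PySem.List.sorted s (fun x => x) false = s) :
    (stepB value frontier).any (Fc value) = frontier.any (Fc value)
    ∧ ∀ x ∈ stepB value frontier, x.length = L - 1 ∧ PySem.List.sorted x (fun x => x) false = x := by
  constructor
  · unfold stepB
    rw [foldl_set_any _ _ (fun s =>
        if s.foldl (fun a x => a * x) 1 < value || pySum s > value || PySem.List.pyGetD s (-1) 0 > value
        then false
        else (pick2 s).any (fun q =>
          Fc value (q.2.2 ++ [q.1 + q.2.1]) || Fc value (q.2.2 ++ [q.1 * q.2.1]))) (Fc value) ?_ _]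
    · have : (PySem.Set.empty : PySem.Set (List Int)).any (Fc value) = false := rfl
      rw [this, Bool.false_or]
      refine any_congr_mem (fun s hs => ?_)
      obtain ⟨hlen, hcanon⟩ := hinv s hs
      have hne : s ≠ [] := by intro h; subst h; simp at hlen; omega
      rw [Fc_step (value := value) (r := s) (by omega),
        ← canon_last_eq_maxv hne hcanon]
      rfl
    · intro acc s hs
      dsimp only
      split
      · simp
      · exact inner_any value s acc
  · unfold stepB
    intro x hx
    have := foldl_set_mem frontier _
      (fun x => x.length = L - 1 ∧ PySem.List.sorted x (fun x => x) false = x) ?_ _ x hx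
    · rcases this with h | h
      · exact absurd h (by simp [PySem.Set.empty])
      · exact h
    · intro acc s hs y hy
      obtain ⟨hlen, _⟩ := hinv s hs
      dsimp only at hy
      split at hy
      · exact Or.inl hy
      · rcases inner_mem value s acc y hy with h | h
        · exact Or.inl h
        · exact Or.inr (by rw [← hlen]; exact h)

theorem iterate_inv (value : Int) (nb : List Int) : ∀ (m : Nat), m ≤ nb.length - 1 →
    ((List.range m).foldl (fun f _ => stepB value f)
        (PySem.Set.ofList [PySem.List.sorted nb (fun x => x) false])).any (Fc value)
      = Fc value (PySem.List.sorted nb (fun x => x) false)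
    ∧ ∀ s ∈ (List.range m).foldl (fun f _ => stepB value f)
        (PySem.Set.ofList [PySem.List.sorted nb (fun x => x) false]),
        s.length = nb.length - m ∧ PySem.List.sorted s (fun x => x) false = s := by
  intro m
  induction m with
  | zero =>
    intro _
    have hof : PySem.Set.ofList [PySem.List.sorted nb (fun x => x) false]
        = [PySem.List.sorted nb (fun x => x) false] := rfl
    rw [List.range_zero, List.foldl_nil, hof]
    refine ⟨by simp, ?_⟩
    intro s hs
    rcases List.mem_singleton.mp hs with rfl
    exact ⟨by rw [PySem.List.length_sorted]; omega, PySem.List.sorted_sorted ..⟩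
  | succ m ih =>
    intro hm
    obtain ⟨ih1, ih2⟩ := ih (by omega)
    rw [List.range_succ, List.foldl_append, List.foldl_cons, List.foldl_nil]
    have hL : 2 ≤ nb.length - m := by omega
    obtain ⟨s1, s2⟩ := stepB_spec value (nb.length - m) hL _ ih2
    refine ⟨by rw [s1, ih1], ?_⟩
    intro s hs
    obtain ⟨hl, hc⟩ := s2 s hs
    exact ⟨by omega, hc⟩

theorem alt_spec (value : Int) (nb : List Int) :
    can_create_value_alt value nb = Fc value (PySem.List.sorted nb (fun x => x) false) := by
  rcases nb with _ | ⟨x0, nb'⟩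
  · rfl
  · set nb := x0 :: nb' with hnb
    have hfold : can_create_value_alt value nb
        = ((List.range (nb.length - 1)).foldl (fun f _ => stepB value f)
            (PySem.Set.ofList [PySem.List.sorted nb (fun x => x) false])).any
            (fun s => s.length == 1 && (PySem.List.pyGetD s 0 0) == value) := rfl
    rw [hfold]
    obtain ⟨h1, h2⟩ := iterate_inv value nb (nb.length - 1) (le_refl _)
    rw [← h1]
    refine any_congr_mem (fun s hs => ?_)
    obtain ⟨hl, _⟩ := h2 s hs
    have hl1 : s.length = 1 := by rw [hl]; simp [hnb]
    rw [Fc_one hl1]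
    obtain ⟨a, rfl⟩ := List.length_eq_one_iff.mp hl1
    simp [PySem.List.pyGetD_zero]

-- ===== VERDICT (by name: the statement is the Claim_ definition above) =====
theorem can_create_value_empty (v : Int) : can_create_value v [] = false := by
  unfold can_create_value
  rw [show PySem.List.sorted ([] : List Int) (fun x => x) true = [] from rfl, btrack]
  simp only [PySem.Dict.get?_empty]
  split_ifs <;> simp_all [PySem.List.max?]

theorem can_create_value_spec : Claim_equal_can_create_value := by
  intro value nb _ _
  unfold Spec_can_create_value
  rcases hnb : nb with _ | ⟨x, nb'⟩
  · rw [can_create_value_empty, alt_spec]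
    rfl
  · rw [← hnb]
    have hne : nb ≠ [] := by rw [hnb]; simp
    have hdne : PySem.List.sorted nb (fun x => x) true ≠ [] := by
      intro h
      rw [PySem.List.sorted_eq_nil_iff] at h
      exact hne h
    obtain ⟨h1, _⟩ := btrack_spec value (nb.length + 1) (PySem.List.sorted nb (fun x => x) true)
      PySem.Dict.empty hdne
      (by rw [PySem.List.length_sorted]; omega)
      (fun k v h => by rw [PySem.Dict.get?_empty] at h; cases h)
    unfold can_create_value
    rw [h1, alt_spec]
    unfold Fc
    rw [PySem.List.length_sorted, PySem.List.length_sorted]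
    exact F_perm value nb.length
      ((PySem.List.sorted_perm ..).trans (PySem.List.sorted_perm ..).symm)
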